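-- pv_equiv track=rewrite | github.com/Aasthaengg/IBMdataset | Python_codes/p02715/s934893715.py | f
-- ===== SOURCE A (Python) =====
-- m = 10**9+7
--
-- def f(n, k):
--   res = 0
--   lst = [0]*(k+1)
--   for i in range(k, 0, -1):
--     lst[i] = pow((k//i), n, m) - sum(lst[i*j] for j in range(2, k//i+1))%m
--     res += i*lst[i]
--     res %= m
--   return res
-- ===== SOURCE B (Python) =====
-- m = 10**9+7
--
-- def f(n, k):
--     phi = list(range(k+1))
--     for i in range(1, k+1):
--         for j in range(2*i, k+1, i):
--             phi[j] -= phi[i]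
--     return sum(phi[h] * pow(k//h, n, m) for h in range(1, k+1)) % m
-- ===== Notes on version B (the rewrite author's own statement) =====
-- stated objective: alternative
-- what changed: Replaces the descending Moebius-style subtraction table lst[i] = (k//i)^n - sum(lst[i*j]) with an Euler-totient sieve (phi[j] -= phi[i] over multiples) followed by the collapsed sum S = sum_h phi(h)*(k//h)^n mod m.
import Mathlib
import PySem

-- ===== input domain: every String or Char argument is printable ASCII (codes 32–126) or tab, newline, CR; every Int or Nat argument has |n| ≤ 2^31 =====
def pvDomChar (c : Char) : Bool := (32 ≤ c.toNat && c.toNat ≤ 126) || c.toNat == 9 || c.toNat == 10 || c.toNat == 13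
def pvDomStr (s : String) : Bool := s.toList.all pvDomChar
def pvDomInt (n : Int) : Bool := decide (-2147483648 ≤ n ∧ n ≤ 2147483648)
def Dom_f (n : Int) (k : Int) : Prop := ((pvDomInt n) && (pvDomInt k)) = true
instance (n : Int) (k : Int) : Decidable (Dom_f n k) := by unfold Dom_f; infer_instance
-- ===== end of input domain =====

-- B replaces A's descending Möbius-style subtraction table by an Euler-totient sieve plus the
-- collapsed sum Σ_h φ(h)·(k//h)^n mod m (alternative decomposition, similar cost).

def mconst : Int := 10^9+7

-- pow(b, n, m) for an Int exponent: PySem.Int.powMod when n ≥ 0; for n < 0 Python (3.8+) first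
-- inverts b mod m and then raises the inverse to -n.  The inverse is computed here via the
-- Bézout coefficient Int.gcdA, which is exact whenever gcd(b, m) = 1 — true for every call the
-- two programs make (their bases are k//i ∈ [1, k] with k ≤ 2^31 < m); where Python would raise
-- ValueError (non-invertible base) neither program reaches this helper.
def pyPowMod (b : Int) (n : Int) (md : Int) : Int :=
  if 0 ≤ n then PySem.Int.powMod b n.toNat md
  else PySem.Int.powMod (PySem.Int.mod (Int.gcdA (PySem.Int.mod b md) md) md) n.natAbs md

-- ===== PORT A =====
def f (n : Int) (k : Int) : Int :=
  ((PySem.List.pyRange k 0 (-1)).foldl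
    (fun (st : List Int × Int) (i : Int) =>
      let lst := st.1
      -- the indices i*j, 2 ≤ j ≤ k//i, are provably in range, so the total pyGetD is exact here
      let s := (PySem.List.pyRange 2 (PySem.Int.floordiv k i + 1) 1).foldl
                 (fun a j => a + PySem.List.pyGetD lst (i*j) 0) 0
      let lst := PySem.List.pySetD lst i
                   (pyPowMod (PySem.Int.floordiv k i) n mconst - PySem.Int.mod s mconst)
      let res := PySem.Int.mod (st.2 + i * PySem.List.pyGetD lst i 0) mconst
      (lst, res))
    (List.replicate (k+1).toNat 0, 0)).2

-- ===== PORT B =====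
def f_alt (n : Int) (k : Int) : Int :=
  let phi := (PySem.List.pyRange 1 (k+1) 1).foldl
    (fun phi i =>
      (PySem.List.pyRange (2*i) (k+1) i).foldl
        (fun ph j => PySem.List.pySetD ph j
            (PySem.List.pyGetD ph j 0 - PySem.List.pyGetD ph i 0)) phi)
    (PySem.List.pyRange 0 (k+1) 1)
  PySem.Int.mod
    ((PySem.List.pyRange 1 (k+1) 1).foldl
      (fun a h => a + PySem.List.pyGetD phi h 0 * pyPowMod (PySem.Int.floordiv k h) n mconst) 0)
    mconst

-- ===== PRECONDITION & SPEC =====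
def Spec_f (n : Int) (k : Int) (out : Int) : Prop := out = f_alt n k
instance (n : Int) (k : Int) (out : Int) : Decidable (Spec_f n k out) := by unfold Spec_f; infer_instance

-- ===== CLAIM (what is proved, stated in full; the proofs are below) =====
def Claim_equal_f : Prop := ∀ (n : Int) (k : Int), Dom_f n k → Spec_f n k (f n k)

-- ===== LEMMAS AND PROOFS =====

def MN : Nat := 1000000007


-- (k//i)^n mod m, the quantity both programs attach to an index i

def Fv (n k : Int) (i : Nat) : Int := pyPowMod (PySem.Int.floordiv k (i:Int)) n mconst

def L (n k : Int) (i : Nat) : Int :=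
  if h : 1 ≤ i ∧ i ≤ k.toNat then
    Fv n k i -
      PySem.Int.mod (∑ j ∈ (Finset.Ico 2 (k.toNat / i + 1)).attach, L n k (i * j.1)) mconst
  else 0
termination_by k.toNat + 1 - i
decreasing_by
  have hj := j.2
  simp only [Finset.mem_Ico] at hj
  have : i + 1 ≤ i * j.1 := by nlinarith [h.1, hj.1]
  omega

def stepA (n k : Int) (st : List Int × Int) (i : Int) : List Int × Int :=
  let lst := st.1
  let s := (PySem.List.pyRange 2 (PySem.Int.floordiv k i + 1) 1).foldl
             (fun a j => a + PySem.List.pyGetD lst (i*j) 0) 0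
  let lst := PySem.List.pySetD lst i
               (pyPowMod (PySem.Int.floordiv k i) n mconst - PySem.Int.mod s mconst)
  let res := PySem.Int.mod (st.2 + i * PySem.List.pyGetD lst i 0) mconst
  (lst, res)

def stepS (k : Int) (phi : List Int) (i : Int) : List Int :=
  (PySem.List.pyRange (2*i) (k+1) i).foldl
    (fun ph j => PySem.List.pySetD ph j
        (PySem.List.pyGetD ph j 0 - PySem.List.pyGetD ph i 0)) phi


theorem f_unfold (n k : Int) :
    f n k = ((PySem.List.pyRange k 0 (-1)).foldl (stepA n k)
              (List.replicate (k+1).toNat 0, 0)).2 := rfl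

theorem f_alt_unfold (n k : Int) :
    f_alt n k = PySem.Int.mod
      ((PySem.List.pyRange 1 (k+1) 1).foldl
        (fun a h => a + PySem.List.pyGetD
            ((PySem.List.pyRange 1 (k+1) 1).foldl (stepS k) (PySem.List.pyRange 0 (k+1) 1)) h 0
          * pyPowMod (PySem.Int.floordiv k h) n mconst) 0) mconst := rfl

theorem pyRange_pos_nil (a b : Int) {s : Int} (hs : 0 < s) (h : b ≤ a) :
    PySem.List.pyRange a b s = [] := by
  rw [PySem.List.pyRange_of_pos a b hs]; simp [show ¬ a < b by omega]

theorem pyRange_pos_cons (a b : Int) {s : Int} (hs : 0 < s) (h : a < b) :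
    PySem.List.pyRange a b s = a :: PySem.List.pyRange (a+s) b s := by
  rw [PySem.List.pyRange_of_pos a b hs, PySem.List.pyRange_of_pos (a+s) b hs]
  have hsne : s ≠ 0 := by omega
  have hkey : b - a + s - 1 = (b - (a+s) + s - 1) + 1 * s := by ring
  have hdiv : (b - a + s - 1) / s = (b - (a+s) + s - 1) / s + 1 := by
    rw [hkey, Int.add_mul_ediv_right _ _ hsne]
  by_cases h2 : a + s < b
  · have hnn : 0 ≤ (b - (a+s) + s - 1) / s := by
      apply Int.ediv_nonneg <;> omega
    rw [if_pos h, if_pos h2, hdiv]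
    rw [Int.toNat_add hnn (by norm_num)]
    simp only [Int.toNat_one, List.range_succ_eq_map, List.map_cons, List.map_map]
    refine congrArg₂ List.cons (by ring) ?_
    refine List.map_congr_left (fun x hx => ?_)
    simp [Function.comp]
    ring
  · have hz : (b - (a+s) + s - 1) / s = 0 := by
      apply Int.ediv_eq_zero_of_lt <;> omega
    rw [if_pos h, if_neg h2, hdiv, hz]
    norm_num

theorem fapi_aux (G : Int → Int) (a : Int) : ∀ (n : Nat) (init : Int),
    (PySem.List.pyRange a (a + (n:Int)) 1).foldl (fun s j => s + G j) init
      = init + ∑ j ∈ Finset.Ico a (a + (n:Int)), G j := by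
  intro n
  induction n with
  | zero =>
    intro init
    simp only [Nat.cast_zero, add_zero]
    rw [PySem.List.pyRange_one_eq_nil le_rfl]
    simp
  | succ n ih =>
    intro init
    have e : a + ((n+1:Nat):Int) = (a + (n:Int)) + 1 := by push_cast; ring
    rw [e, PySem.List.pyRange_one_succ_right (by omega), List.foldl_append, ih]
    have hins : Finset.Ico a (a + (n:Int) + 1) = insert (a + (n:Int)) (Finset.Ico a (a + (n:Int))) := by
      ext x; simp only [Finset.mem_Ico, Finset.mem_insert]; omega
    rw [hins, Finset.sum_insert (by simp [Finset.mem_Ico])]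
    simp only [List.foldl_cons, List.foldl_nil]
    ring

theorem foldl_add_pyRange_int (G : Int → Int) (a b : Int) (init : Int) :
    (PySem.List.pyRange a b 1).foldl (fun s j => s + G j) init
      = init + ∑ j ∈ Finset.Ico a b, G j := by
  by_cases hab : a < b
  · have hb : b = a + ((b - a).toNat : Int) := by omega
    rw [hb]
    exact fapi_aux G a (b - a).toNat init
  · rw [PySem.List.pyRange_one_eq_nil (by omega), Finset.Ico_eq_empty (by omega)]
    simp

theorem foldl_add_pyRange_nat (G : Int → Int) (a : Nat) : ∀ (c : Nat), ∀ (init : Int),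
    (PySem.List.pyRange (a:Int) (c:Int) 1).foldl (fun s j => s + G j) init
      = init + ∑ j ∈ Finset.Ico a c, G (j:Int) := by
  intro c
  induction c with
  | zero =>
    intro init
    rw [PySem.List.pyRange_one_eq_nil (by exact_mod_cast Nat.zero_le a)]
    simp
  | succ c ih =>
    intro init
    by_cases hac : a ≤ c
    · have : ((c+1 : Nat) : Int) = (c:Int) + 1 := by push_cast; ring
      rw [this, PySem.List.pyRange_one_succ_right (by exact_mod_cast hac), List.foldl_append, ih]
      rw [Finset.sum_Ico_succ_top hac]
      simp [add_assoc]
    · rw [PySem.List.pyRange_one_eq_nil (by exact_mod_cast Nat.succ_le_of_lt (Nat.lt_of_not_le hac))]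
      rw [Finset.Ico_eq_empty (by omega)]
      simp

theorem sum_Ico_int_nat (G : Int → Int) (K : Nat) :
    ∑ j ∈ Finset.Ico (1:Int) ((K:Int)+1), G j = ∑ h ∈ Finset.Icc 1 K, G (h:Int) := by
  refine Finset.sum_nbij' (fun z => z.toNat) (fun h => (h:Int)) ?_ ?_ ?_ ?_ ?_
  · intro z hz; simp only [Finset.mem_Ico] at hz; simp only [Finset.mem_Icc]; omega
  · intro h hh; simp only [Finset.mem_Icc] at hh; simp only [Finset.mem_Ico]; omega
  · intro z hz
    simp only [Finset.mem_Ico] at hz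
    show ((z.toNat : Nat) : Int) = z
    omega
  · intro h hh
    simp only [Finset.mem_Icc] at hh
    show ((h:Int)).toNat = h
    omega
  · intro z hz
    simp only [Finset.mem_Ico] at hz
    show G z = G ((z.toNat : Nat) : Int)
    exact congrArg G (by omega)

theorem mod_idem (a : Int) : PySem.Int.mod (PySem.Int.mod a mconst) mconst = PySem.Int.mod a mconst := by
  rw [PySem.Int.mod_eq_emod_of_pos (by norm_num [mconst]), PySem.Int.mod_eq_emod_of_pos (by norm_num [mconst])]
  exact Int.emod_emod_of_dvd a dvd_rfl

theorem mod_add_left (a b : Int) :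
    PySem.Int.mod (PySem.Int.mod a mconst + b) mconst = PySem.Int.mod (a + b) mconst := by
  rw [PySem.Int.mod_eq_emod_of_pos (by norm_num [mconst]), PySem.Int.mod_eq_emod_of_pos (by norm_num [mconst]), PySem.Int.mod_eq_emod_of_pos (by norm_num [mconst])]
  exact Int.emod_add_emod a mconst b

theorem cast_mod (a : Int) :
    ((PySem.Int.mod a mconst : Int) : ZMod MN) = (a : ZMod MN) := by
  rw [PySem.Int.mod_eq_emod_of_pos (by norm_num [mconst]), Int.emod_def]
  have h0 : ((mconst : Int) : ZMod MN) = 0 := by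
    have e : (mconst : Int) = ((MN : Nat) : Int) := by norm_num [mconst, MN]
    rw [e]
    push_cast
    exact ZMod.natCast_self MN
  push_cast
  rw [h0]
  ring

theorem L_eq (n : Int) (K i : Nat) (h1 : 1 ≤ i) (h2 : i ≤ K) :
    L n (K:Int) i = Fv n (K:Int) i -
      PySem.Int.mod (∑ j ∈ Finset.Ico 2 (K / i + 1), L n (K:Int) (i * j)) mconst := by
  rw [L]
  rw [dif_pos (by simp [Int.toNat_natCast]; omega)]
  rw [Int.toNat_natCast]
  rw [Finset.sum_attach (Finset.Ico 2 (K / i + 1)) (fun j => L n (K:Int) (i * j))]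

theorem foldA (n : Int) (K : Nat) : ∀ (t : Nat), t ≤ K →
    ∀ (lst : List Int), lst.length = K + 1 →
    (∀ u : Nat, t < u → u ≤ K → PySem.List.pyGetD lst (u:Int) 0 = L n (K:Int) u) →
    ∀ (res : Int), PySem.Int.mod res mconst = res →
    ((PySem.List.pyRange (t:Int) 0 (-1)).foldl (stepA n (K:Int)) (lst, res)).2
      = PySem.Int.mod (res + ∑ i ∈ Finset.Icc 1 t, (i:Int) * L n (K:Int) i) mconst := by
  intro t
  induction t with
  | zero =>
    intro _ lst _ _ res hres
    rw [PySem.List.pyRange_neg_one_eq_nil (by norm_num)]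
    simpa using hres.symm
  | succ t ih =>
    intro htK lst hlen hup res hres
    have hcons : PySem.List.pyRange ((t+1:Nat):Int) 0 (-1)
        = ((t+1:Nat):Int) :: PySem.List.pyRange ((t:Nat):Int) 0 (-1) := by
      rw [PySem.List.pyRange_neg_one_cons (by push_cast; omega)]
      congr 1
      push_cast; ring
    rw [hcons]
    simp only [List.foldl_cons]
    -- evaluate the step at i = t+1
    have hfd : PySem.Int.floordiv (K:Int) ((t+1:Nat):Int) = ((K/(t+1) : Nat) : Int) :=
      PySem.Int.floordiv_natCast K (t+1)
    have hsum : (PySem.List.pyRange 2 (PySem.Int.floordiv (K:Int) ((t+1:Nat):Int) + 1) 1).foldl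
          (fun a j => a + PySem.List.pyGetD lst (((t+1:Nat):Int)*j) 0) 0
        = ∑ j ∈ Finset.Ico 2 (K/(t+1)+1), L n (K:Int) ((t+1)*j) := by
      rw [hfd]
      have h2 : (2:Int) = ((2:Nat):Int) := by norm_num
      have hc : ((K/(t+1):Nat):Int) + 1 = ((K/(t+1)+1 : Nat):Int) := by push_cast; ring
      rw [h2, hc, foldl_add_pyRange_nat (fun j => PySem.List.pyGetD lst (((t+1:Nat):Int)*j) 0) 2 (K/(t+1)+1) 0]
      rw [zero_add]
      apply Finset.sum_congr rfl
      intro j hj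
      simp only [Finset.mem_Ico] at hj
      have hjle : j ≤ K/(t+1) := by omega
      have huK : (t+1)*j ≤ K := by
        have := (Nat.le_div_iff_mul_le (by omega : 0 < t+1)).mp hjle
        rw [Nat.mul_comm]; exact this
      have hcast : (((t+1)*j : Nat) : Int) = ((t+1:Nat):Int) * (j:Int) := by push_cast; ring
      rw [← hcast]
      exact hup ((t+1)*j) (by nlinarith) huK
    have hv : pyPowMod (PySem.Int.floordiv (K:Int) ((t+1:Nat):Int)) n mconst
          - PySem.Int.mod ((PySem.List.pyRange 2 (PySem.Int.floordiv (K:Int) ((t+1:Nat):Int) + 1) 1).foldl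
              (fun a j => a + PySem.List.pyGetD lst (((t+1:Nat):Int)*j) 0) 0) mconst
        = L n (K:Int) (t+1) := by
      rw [hsum, L_eq n K (t+1) (by omega) htK]
      rfl
    -- name the step components
    set v := L n (K:Int) (t+1) with hvdef
    have hstep : stepA n (K:Int) (lst, res) ((t+1:Nat):Int)
        = (PySem.List.pySetD lst ((t+1:Nat):Int) v,
           PySem.Int.mod (res + ((t+1:Nat):Int) * v) mconst) := by
      unfold stepA
      simp only []
      rw [hv]
      have hget : PySem.List.pyGetD (PySem.List.pySetD lst ((t+1:Nat):Int) v) ((t+1:Nat):Int) 0 = v := by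
        rw [PySem.List.pyGetD_pySetD_natCast lst (t+1) (t+1) v 0 (by omega)]
        simp
      rw [hget]
    rw [hstep]
    have hlen' : (PySem.List.pySetD lst ((t+1:Nat):Int) v).length = K + 1 := by
      rw [PySem.List.length_pySetD]; exact hlen
    have hup' : ∀ u : Nat, t < u → u ≤ K →
        PySem.List.pyGetD (PySem.List.pySetD lst ((t+1:Nat):Int) v) (u:Int) 0 = L n (K:Int) u := by
      intro u hu huK
      rw [PySem.List.pyGetD_pySetD_natCast lst (t+1) u v 0 (by omega)]
      by_cases he : u = t+1
      · rw [if_pos he, he]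
      · rw [if_neg he]
        exact hup u (by omega) huK
    have hres' : PySem.Int.mod (PySem.Int.mod (res + ((t+1:Nat):Int) * v) mconst) mconst
        = PySem.Int.mod (res + ((t+1:Nat):Int) * v) mconst := mod_idem _
    rw [ih (by omega) _ hlen' hup' _ hres']
    rw [mod_add_left]
    congr 1
    rw [Finset.sum_Icc_succ_top (by omega : 1 ≤ t+1)]
    push_cast
    ring


theorem fA (n : Int) (K : Nat) :
    f n (K:Int) = PySem.Int.mod (∑ i ∈ Finset.Icc 1 K, (i:Int) * L n (K:Int) i) mconst := by
  rw [f_unfold]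
  have htn : ((K:Int)+1).toNat = K + 1 := by omega
  rw [htn]
  have hres0 : PySem.Int.mod 0 mconst = 0 := by
    rw [PySem.Int.mod_eq_emod_of_pos (by norm_num [mconst])]
    exact Int.zero_emod _
  have hmain := foldA n K K le_rfl (List.replicate (K+1) 0) (by simp)
    (fun u hu huK => absurd hu (by omega)) 0 hres0
  rw [zero_add] at hmain
  exact hmain

def psum (t j : Nat) : Int :=
  ∑ d ∈ j.divisors.filter (fun d => d < t ∧ d ≠ j), (Nat.totient d : Int)

theorem psum_ge (t j : Nat) (hj : 1 ≤ j) (h : j ≤ t) :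
    psum t j = (j:Int) - (Nat.totient j : Int) := by
  unfold psum
  have hfe : j.divisors.filter (fun d => d < t ∧ d ≠ j) = j.divisors.erase j := by
    ext d
    simp only [Finset.mem_filter, Finset.mem_erase, Nat.mem_divisors]
    constructor
    · rintro ⟨⟨hd, hj0⟩, _, hne⟩; exact ⟨hne, hd, hj0⟩
    · rintro ⟨hne, hd, hj0⟩
      have hdle : d ≤ j := Nat.le_of_dvd (by omega) hd
      exact ⟨⟨hd, hj0⟩, by omega, hne⟩
  rw [hfe]
  have hmem : j ∈ j.divisors := Nat.mem_divisors_self j (by omega)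
  have h1 : (Nat.totient j : Int) + ∑ d ∈ j.divisors.erase j, (Nat.totient d : Int)
      = ∑ d ∈ j.divisors, (Nat.totient d : Int) :=
    Finset.add_sum_erase j.divisors (fun d => (Nat.totient d : Int)) hmem
  have htot : ∑ d ∈ j.divisors, (Nat.totient d : Int) = (j : Int) := by
    rw [← Nat.cast_sum]
    exact_mod_cast congrArg (Nat.cast : Nat → Int) (Nat.sum_totient j)
  linarith

theorem psum_succ (t j : Nat) :
    psum (t+1) j = psum t j + (if t ∣ j ∧ t < j then (Nat.totient t : Int) else 0) := by
  unfold psum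
  by_cases hc : t ∣ j ∧ t < j
  · rw [if_pos hc]
    have hmem : t ∈ j.divisors.filter (fun d => d < t + 1 ∧ d ≠ j) := by
      simp only [Finset.mem_filter, Nat.mem_divisors]
      exact ⟨⟨hc.1, by omega⟩, by omega, by omega⟩
    rw [← Finset.add_sum_erase _ _ hmem]
    have : (j.divisors.filter (fun d => d < t + 1 ∧ d ≠ j)).erase t
         = j.divisors.filter (fun d => d < t ∧ d ≠ j) := by
      ext d
      simp only [Finset.mem_erase, Finset.mem_filter, Nat.mem_divisors]
      constructor
      · rintro ⟨hne, ⟨hd, hj0⟩, hlt, hdj⟩; exact ⟨⟨hd, hj0⟩, by omega, hdj⟩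
      · rintro ⟨⟨hd, hj0⟩, hlt, hdj⟩; exact ⟨by omega, ⟨hd, hj0⟩, by omega, hdj⟩
    rw [this]; ring
  · rw [if_neg hc]
    have : j.divisors.filter (fun d => d < t + 1 ∧ d ≠ j)
         = j.divisors.filter (fun d => d < t ∧ d ≠ j) := by
      ext d
      simp only [Finset.mem_filter, Nat.mem_divisors]
      constructor
      · rintro ⟨⟨hd, hj0⟩, hlt, hdj⟩
        refine ⟨⟨hd, hj0⟩, ?_, hdj⟩
        rcases Nat.lt_or_ge d t with h | h
        · exact h
        · exfalso
          have hdt : d = t := by omega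
          subst hdt
          have : d ≤ j := Nat.le_of_dvd (by omega) hd
          exact hc ⟨hd, by omega⟩
      · rintro ⟨⟨hd, hj0⟩, hlt, hdj⟩; exact ⟨⟨hd, hj0⟩, by omega, hdj⟩
    rw [this]; ring

def InvO (K t : Nat) (phi : List Int) : Prop :=
  phi.length = K + 1 ∧
  ∀ j : Nat, j ≤ K → PySem.List.pyGetD phi (j:Int) 0 = (j:Int) - psum t j

def InvI (K t q : Nat) (phi : List Int) : Prop :=
  phi.length = K + 1 ∧
  ∀ j : Nat, j ≤ K → PySem.List.pyGetD phi (j:Int) 0 =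
    (j:Int) - psum t j - (if t ∣ j ∧ t < j ∧ j < q*t then (Nat.totient t : Int) else 0)

theorem sieveInner (K t : Nat) (ht : 1 ≤ t) (htK : t ≤ K) :
    ∀ (q : Nat), 2 ≤ q → ∀ (phi : List Int), InvI K t q phi →
    InvI K t (K/t + 1)
      ((PySem.List.pyRange ((q*t : Nat) : Int) ((K:Int)+1) (t:Int)).foldl
        (fun ph j => PySem.List.pySetD ph j
            (PySem.List.pyGetD ph j 0 - PySem.List.pyGetD ph ((t:Nat):Int) 0)) phi) := by
  suffices H : ∀ (m q : Nat), m = K + 1 - q*t → 2 ≤ q → ∀ phi, InvI K t q phi →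
      InvI K t (K/t + 1)
        ((PySem.List.pyRange ((q*t : Nat) : Int) ((K:Int)+1) (t:Int)).foldl
          (fun ph j => PySem.List.pySetD ph j
              (PySem.List.pyGetD ph j 0 - PySem.List.pyGetD ph ((t:Nat):Int) 0)) phi) by
    exact fun q hq phi h => H (K + 1 - q*t) q rfl hq phi h
  intro m
  induction m using Nat.strong_induction_on with
  | _ m ih =>
    intro q hm hq phi hphi
    have hdm := Nat.div_add_mod K t
    have hmlt := Nat.mod_lt K (show 0 < t by omega)
    have e0 : (K/t+1)*t = t*(K/t) + t := by ring
    by_cases hqt : K < q*t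
    · rw [pyRange_pos_nil _ _ (by exact_mod_cast ht) (by push_cast; omega)]
      simp only [List.foldl_nil]
      obtain ⟨hlen, hval⟩ := hphi
      refine ⟨hlen, fun j hj => ?_⟩
      rw [hval j hj]
      congr 1
      apply if_congr _ rfl rfl
      constructor
      · rintro ⟨h1, h2, _⟩; exact ⟨h1, h2, by omega⟩
      · rintro ⟨h1, h2, _⟩; exact ⟨h1, h2, by omega⟩
    · have hcons : PySem.List.pyRange ((q*t:Nat):Int) ((K:Int)+1) (t:Int)
          = ((q*t:Nat):Int) :: PySem.List.pyRange (((q+1)*t:Nat):Int) ((K:Int)+1) (t:Int) := by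
        rw [pyRange_pos_cons _ _ (by exact_mod_cast ht) (by push_cast; omega)]
        congr 1
        push_cast; ring
      rw [hcons]
      simp only [List.foldl_cons]
      obtain ⟨hlen, hval⟩ := hphi
      have hj0K : q*t ≤ K := by omega
      have htlt : t < q*t := by nlinarith
      have hphit : PySem.List.pyGetD phi ((t:Nat):Int) 0 = (Nat.totient t : Int) := by
        rw [hval t htK, psum_ge t t ht le_rfl]
        simp
      have hinv' : InvI K t (q+1)
          (PySem.List.pySetD phi ((q*t:Nat):Int)
            (PySem.List.pyGetD phi ((q*t:Nat):Int) 0 - PySem.List.pyGetD phi ((t:Nat):Int) 0)) := by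
        constructor
        · rw [PySem.List.length_pySetD]; exact hlen
        · intro j hj
          rw [PySem.List.pyGetD_pySetD_natCast phi (q*t) j _ 0 (by omega)]
          by_cases he : j = q*t
          · rw [if_pos he, he, hphit, hval (q*t) hj0K]
            have hco1 : ¬ (t ∣ q*t ∧ t < q*t ∧ q*t < q*t) := by
              rintro ⟨_, _, hx⟩; omega
            have hco2 : t ∣ q*t ∧ t < q*t ∧ q*t < (q+1)*t := by
              exact ⟨⟨q, by ring⟩, htlt, by nlinarith⟩
            rw [if_neg hco1, if_pos hco2]
            ring
          · rw [if_neg he, hval j hj]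
            congr 1
            apply if_congr _ rfl rfl
            constructor
            · rintro ⟨h1, h2, h3⟩; exact ⟨h1, h2, by nlinarith⟩
            · rintro ⟨h1, h2, h3⟩
              refine ⟨h1, h2, ?_⟩
              obtain ⟨r, hr⟩ := h1
              subst hr
              have hrq : r < q + 1 := by
                by_contra hge
                have hge' : q + 1 ≤ r := by omega
                have : (q+1)*t ≤ t*r := by
                  calc (q+1)*t = t*(q+1) := by ring
                  _ ≤ t*r := Nat.mul_le_mul_left t hge'
                omega
              have hrne : r ≠ q := by
                intro hrq'; subst hrq'; exact he (by ring)
              have h5 : t*(r+1) ≤ t*q := Nat.mul_le_mul_left t (by omega)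
              have h6 : t*q = q*t := by ring
              have h7 : t*(r+1) = t*r + t := by ring
              omega
      have hmeas : K + 1 - (q+1)*t < m := by
        have e1 : (q+1)*t = q*t + t := by ring
        omega
      exact ih (K + 1 - (q+1)*t) (by omega) (q+1) rfl (by omega) _ hinv'

theorem sieveStep_inv (K t : Nat) (ht : 1 ≤ t) (htK : t ≤ K) (phi : List Int)
    (h : InvO K t phi) : InvO K (t+1) (stepS (K:Int) phi (t:Int)) := by
  unfold stepS
  have h2 : 2*((t:Nat):Int) = ((2*t:Nat):Int) := by push_cast; ring
  rw [h2]
  have hstart : InvI K t 2 phi := by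
    obtain ⟨hlen, hval⟩ := h
    refine ⟨hlen, fun j hj => ?_⟩
    rw [hval j hj]
    have : ¬ (t ∣ j ∧ t < j ∧ j < 2*t) := by
      rintro ⟨⟨r, hr⟩, hlt, hlt2⟩
      subst hr
      have hr2 : 2 ≤ r := by
        by_contra hx
        interval_cases r <;> omega
      have : t*2 ≤ t*r := Nat.mul_le_mul_left t hr2
      have e : t*2 = 2*t := by ring
      omega
    rw [if_neg this]
    ring
  have hres := sieveInner K t ht htK 2 le_rfl phi hstart
  obtain ⟨hlen, hval⟩ := hres
  refine ⟨hlen, fun j hj => ?_⟩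
  rw [hval j hj, psum_succ t j]
  have hdm := Nat.div_add_mod K t
  have hmlt := Nat.mod_lt K (show 0 < t by omega)
  have e0 : (K/t+1)*t = t*(K/t) + t := by ring
  by_cases hc : t ∣ j ∧ t < j
  · rw [if_pos hc, if_pos ⟨hc.1, hc.2, by omega⟩]
    ring
  · rw [if_neg hc, if_neg (by rintro ⟨a, b, _⟩; exact hc ⟨a, b⟩)]
    ring

theorem sieveOuter (K : Nat) : ∀ (c : Nat), c ≤ K →
    InvO K (c+1)
      ((PySem.List.pyRange 1 ((c:Int)+1) 1).foldl (stepS (K:Int))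
        (PySem.List.pyRange 0 ((K:Int)+1) 1)) := by
  intro c
  induction c with
  | zero =>
    intro _
    have hnil : PySem.List.pyRange 1 (((0:Nat):Int)+1) 1 = [] :=
      PySem.List.pyRange_one_eq_nil (by norm_num)
    rw [hnil]
    simp only [List.foldl_nil]
    constructor
    · rw [PySem.List.length_pyRange_one]
      omega
    · intro j hj
      rw [PySem.List.pyRange_one 0 ((K:Int)+1)]
      rw [PySem.List.pyGetD_natCast]
      rw [PySem.List.getD_map_range _ _ _ _ (by omega)]
      have : psum 1 j = 0 := by
        unfold psum
        rw [Finset.filter_false_of_mem, Finset.sum_empty]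
        intro d hd
        have := Nat.pos_of_mem_divisors hd
        simp
        omega
      rw [this]
      ring
  | succ c ih =>
    intro hcK
    have hsplit : PySem.List.pyRange 1 (((c+1:Nat):Int)+1) 1
        = PySem.List.pyRange 1 ((c:Int)+1) 1 ++ [(c:Int)+1] := by
      have e : ((c+1:Nat):Int) + 1 = ((c:Int)+1) + 1 := by push_cast; ring
      rw [e, PySem.List.pyRange_one_succ_right (by omega)]
    rw [hsplit, List.foldl_append]
    simp only [List.foldl_cons, List.foldl_nil]
    have e2 : (c:Int)+1 = ((c+1:Nat):Int) := by push_cast; ring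
    rw [e2]
    exact sieveStep_inv K (c+1) (by omega) hcK _ (ih (by omega))

theorem fB_sum (n : Int) (K : Nat) (phi : List Int)
    (hphi : ∀ h : Nat, 1 ≤ h → h ≤ K → PySem.List.pyGetD phi ((h:Nat):Int) 0 = (Nat.totient h : Int)) :
    (PySem.List.pyRange 1 ((K:Int)+1) 1).foldl
      (fun a h => a + PySem.List.pyGetD phi h 0 * pyPowMod (PySem.Int.floordiv (K:Int) h) n mconst) 0
    = ∑ h ∈ Finset.Icc 1 K, (Nat.totient h : Int) * Fv n (K:Int) h := by
  rw [foldl_add_pyRange_int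
    (fun h => PySem.List.pyGetD phi h 0 * pyPowMod (PySem.Int.floordiv (K:Int) h) n mconst) 1 ((K:Int)+1) 0]
  rw [zero_add, sum_Ico_int_nat]
  apply Finset.sum_congr rfl
  intro h hh
  simp only [Finset.mem_Icc] at hh
  rw [hphi h hh.1 hh.2]
  rfl


theorem fB (n : Int) (K : Nat) :
    f_alt n (K:Int) =
      PySem.Int.mod (∑ h ∈ Finset.Icc 1 K, (Nat.totient h : Int) * Fv n (K:Int) h) mconst := by
  rw [f_alt_unfold]
  congr 1
  obtain ⟨hlen, hval⟩ := sieveOuter K K le_rfl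
  apply fB_sum
  intro h hh1 hh2
  rw [hval h hh2, psum_ge (K+1) h hh1 (by omega)]
  ring

theorem key_div (n : Int) (K i : Nat) (h1 : 1 ≤ i) (h2 : i ≤ K) :
    ∑ j ∈ Finset.Icc 1 (K/i), ((L n (K:Int) (i*j) : Int) : ZMod MN)
      = ((Fv n (K:Int) i : Int) : ZMod MN) := by
  have hKi : 1 ≤ K/i := by
    rw [Nat.le_div_iff_mul_le (by omega)]; omega
  have hins : Finset.Icc 1 (K/i) = insert 1 (Finset.Icc 2 (K/i)) := by
    ext x; simp only [Finset.mem_Icc, Finset.mem_insert]; omega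
  rw [hins, Finset.sum_insert (by simp)]
  have hico : Finset.Icc 2 (K/i) = Finset.Ico 2 (K/i+1) := by
    ext x; simp only [Finset.mem_Icc, Finset.mem_Ico]; omega
  have hone : ((L n (K:Int) (i*1) : Int) : ZMod MN) = ((L n (K:Int) i : Int) : ZMod MN) := by
    rw [mul_one]
  rw [hone, L_eq n K i h1 h2, Int.cast_sub, cast_mod, Int.cast_sum, hico]
  ring

theorem swap_sum (n : Int) (K : Nat) :
    ((∑ i ∈ Finset.Icc 1 K, (i:Int) * L n (K:Int) i : Int) : ZMod MN)
      = ((∑ h ∈ Finset.Icc 1 K, (Nat.totient h : Int) * Fv n (K:Int) h : Int) : ZMod MN) := by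
  rw [Int.cast_sum, Int.cast_sum]
  simp only [Int.cast_mul, Int.cast_natCast]
  have lhs1 : ∀ i ∈ Finset.Icc 1 K, ((i:Nat) : ZMod MN) * ((L n (K:Int) i : Int) : ZMod MN)
      = ∑ d ∈ i.divisors, ((Nat.totient d : Nat) : ZMod MN) * ((L n (K:Int) i : Int) : ZMod MN) := by
    intro i hi
    rw [← Finset.sum_mul]
    congr 1
    rw [← Nat.cast_sum]
    exact congrArg _ (Nat.sum_totient i).symm
  rw [Finset.sum_congr rfl lhs1]
  have rhs1 : ∀ d ∈ Finset.Icc 1 K, ((Nat.totient d : Nat) : ZMod MN) * ((Fv n (K:Int) d : Int) : ZMod MN)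
      = ∑ j ∈ Finset.Icc 1 (K/d), ((Nat.totient d : Nat) : ZMod MN) * ((L n (K:Int) (d*j) : Int) : ZMod MN) := by
    intro d hd
    simp only [Finset.mem_Icc] at hd
    rw [← Finset.mul_sum, key_div n K d hd.1 hd.2]
  rw [Finset.sum_congr rfl rhs1]
  rw [Finset.sum_sigma', Finset.sum_sigma']
  refine Finset.sum_nbij' (fun p => ⟨p.2, p.1 / p.2⟩) (fun p => ⟨p.1 * p.2, p.1⟩) ?_ ?_ ?_ ?_ ?_
  · rintro ⟨i, d⟩ hp
    simp only [Finset.mem_sigma, Finset.mem_Icc, Nat.mem_divisors] at hp ⊢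
    obtain ⟨⟨hi1, hi2⟩, hdvd, hi0⟩ := hp
    have hd1 : 1 ≤ d := Nat.pos_of_dvd_of_pos hdvd (by omega)
    have hdle : d ≤ i := Nat.le_of_dvd (by omega) hdvd
    refine ⟨⟨by omega, by omega⟩, ?_, Nat.div_le_div_right hi2⟩
    rw [Nat.le_div_iff_mul_le (by omega)]
    rw [one_mul]
    exact hdle
  · rintro ⟨d, j⟩ hp
    simp only [Finset.mem_sigma, Finset.mem_Icc, Nat.mem_divisors] at hp ⊢
    obtain ⟨⟨hd1, hd2⟩, hj1, hj2⟩ := hp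
    have hmul : d * j ≤ K := by
      have := (Nat.le_div_iff_mul_le (by omega : 0 < d)).mp hj2
      calc d * j = j * d := by ring
      _ ≤ K := this
    exact ⟨⟨by nlinarith, hmul⟩, ⟨j, rfl⟩, by nlinarith⟩
  · rintro ⟨i, d⟩ hp
    simp only [Finset.mem_sigma, Finset.mem_Icc, Nat.mem_divisors] at hp
    obtain ⟨⟨hi1, hi2⟩, hdvd, hi0⟩ := hp
    simp only [Sigma.mk.injEq, heq_eq_eq]
    exact ⟨Nat.mul_div_cancel' hdvd, trivial⟩
  · rintro ⟨d, j⟩ hp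
    simp only [Finset.mem_sigma, Finset.mem_Icc] at hp
    obtain ⟨⟨hd1, hd2⟩, hj1, hj2⟩ := hp
    simp only [Sigma.mk.injEq, heq_eq_eq]
    exact ⟨trivial, Nat.mul_div_cancel_left j (by omega)⟩
  · rintro ⟨i, d⟩ hp
    simp only [Finset.mem_sigma, Finset.mem_Icc, Nat.mem_divisors] at hp
    obtain ⟨⟨hi1, hi2⟩, hdvd, hi0⟩ := hp
    show _ = ((Nat.totient d : Nat) : ZMod MN) * ((L n (K:Int) (d * (i/d)) : Int) : ZMod MN)
    rw [Nat.mul_div_cancel' hdvd]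


-- ===== VERDICT (by name: the statement is the Claim_ definition above) =====
theorem f_spec : Claim_equal_f := by
  intro n k _
  unfold Spec_f
  by_cases hk : 0 ≤ k
  · obtain ⟨K, rfl⟩ : ∃ K : Nat, k = (K:Int) := ⟨k.toNat, (Int.toNat_of_nonneg hk).symm⟩
    rw [fA, fB]
    have hcast := swap_sum n K
    rw [ZMod.intCast_eq_intCast_iff] at hcast
    have hm : mconst = ((MN : Nat) : Int) := by norm_num [mconst, MN]
    rw [PySem.Int.mod_eq_emod_of_pos (by norm_num [mconst]),
        PySem.Int.mod_eq_emod_of_pos (by norm_num [mconst]), hm]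
    exact hcast
  · have hk' : k < 0 := by omega
    rw [f_unfold, f_alt_unfold]
    rw [PySem.List.pyRange_neg_one_eq_nil (by omega)]
    simp [PySem.List.pyRange_one_eq_nil (show k+1 ≤ (1:Int) by omega),
          PySem.Int.mod_eq_emod_of_pos (show (0:Int) < mconst by norm_num [mconst])]
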